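-- pv_equiv track=rewrite | github.com/qihqi/henryFACTClient | henry/misc.py | validate_ruc
-- ===== SOURCE A (Python) =====
-- from builtins import str
-- from builtins import zip
-- from builtins import map
--
-- def validate_ruc(uid):
--     if uid[2] == '9': # ruc of private parties
--         coef = [4, 3, 2, 7, 6, 5, 4, 3, 2]
--         the_sum = sum(x * y for x, y in zip(coef, list(map(int, uid[:9]))))
--         the_sum = 11 - the_sum % 11
--         if the_sum > 10:
--             the_sum -= 10
--         return int(uid[9]) == the_sum
--     elif uid[2] == '6': # ruc of public parties
--         coef = [3, 2, 7, 6, 5, 4, 3, 2]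
--         the_sum = sum(x * y for x, y in zip(coef, list(map(int, uid[:8]))))
--         the_sum = 11 - the_sum % 11
--         if the_sum > 10:
--             the_sum -= 10
--         return int(uid[8]) == the_sum
--     else: # ruc of persons
--         return validate_cedula(uid[:10])
--
-- def validate_cedula(uid):
--     first_digits = int(uid[:2])
--     if first_digits < 1 or first_digits > 24:
--         return False
--
--     sum_even = 0
--     sum_old = 0
--     for i, x in enumerate(uid):
--         d = int(x)
--         if i % 2 == 1:  # it is 0 indexed, so odd positions have even index
--             if i == 9:
--                 continue
--             sum_even += d
--         else:
--             d = (d * 2)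
--             if d > 9:
--                 d -= 9
--             sum_old += d
--     sum_all = sum_even + sum_old
--     sum_first_digit = str(sum_all)[0]
--     decena = (int(sum_first_digit) + 1) * 10
--     validator = decena - sum_all
--     if validator == 10:
--         validator = 0
--
--     return validator == int(uid[-1])
-- ===== SOURCE B (Python) =====
-- def validate_ruc(uid):
--     kind = uid[2]
--     if kind == '9':  # ruc of private parties
--         return _mod11(uid, 9)
--     if kind == '6':  # ruc of public parties
--         return _mod11(uid, 8)
--     return _cedula(uid[:10])  # ruc of persons
--
--
-- def _mod11(uid, n):
--     # weights cycle 2,3,4,5,6,7 starting from the rightmost of the first n digits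
--     total = 0
--     w = 2
--     for c in reversed(uid[:n]):
--         total += w * int(c)
--         w = 2 if w == 7 else w + 1
--     r = 11 - total % 11
--     if r > 10:
--         r -= 10
--     return int(uid[n]) == r
--
--
-- def _cedula(ced):
--     head = int(ced[:2])
--     if not (1 <= head <= 24):
--         return False
--     evens = ced[:9:2]   # doubled positions
--     odds = ced[1:9:2]
--     total = sum(int(c) * 2 - 9 * (c > '4') for c in evens) \
--           + sum(int(c) for c in odds)
--     return int(ced[-1]) == (10 - total % 10) % 10
-- ===== Notes on version B (the rewrite author's own statement) =====
-- stated objective: alternative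
-- what changed: The RUC branches drop the hard-coded coefficient lists and instead traverse the digit prefix in reverse with a single weight cycling 2..7, and the cedula check replaces the enumerate/index-parity loop by two strided slices ced[:9:2]/ced[1:9:2] summed separately, with the doubled-digit correction as int(c)*2-9*(c>'4') and the check digit as (10 - total % 10) % 10 instead of the str(sum)[0]/decena construction.
-- intended difference: On cedula-branch inputs whose weighted digit sum S is below 10 and whose last digit equals 10 - S (e.g. '013' or '0100000009'), A's str(sum)[0] decena trick yields the out-of-range validator 9*S+10 so A returns False, while B returns True, the intended value under the standard mod-10 check-digit rule. — e.g. on validate_ruc("013"): A returns false, B returns true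
import Mathlib
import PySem

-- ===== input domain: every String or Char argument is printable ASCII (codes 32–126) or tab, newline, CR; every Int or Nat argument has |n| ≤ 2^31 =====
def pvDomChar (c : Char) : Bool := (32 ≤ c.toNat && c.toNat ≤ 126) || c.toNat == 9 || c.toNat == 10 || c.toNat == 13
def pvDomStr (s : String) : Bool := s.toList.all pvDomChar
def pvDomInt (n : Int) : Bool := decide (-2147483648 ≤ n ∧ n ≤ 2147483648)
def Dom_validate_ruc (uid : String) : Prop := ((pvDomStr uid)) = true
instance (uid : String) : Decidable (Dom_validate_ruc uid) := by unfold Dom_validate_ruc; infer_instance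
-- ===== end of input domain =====

-- B drops A's coefficient lists for a reversed traversal with a cycling 2..7 weight, sums the
-- cedula digits from two strided slices instead of an index-parity loop, and computes the check
-- digit modularly instead of via str(sum)[0] (objective: alternative; on D_ below B fixes A).

-- ===== PORT A =====
-- int(c) for a single digit character; exact on digit chars (the only ones Pre_ admits where it is consumed)
def pvDigit (c : Char) : Int := (c.toNat : Int) - 48

-- step of A's `for i, x in enumerate(uid)` loop; state = (sum_even, sum_old)
def pvCedStepA (st : Int × Int) (q : Int × Char) : Int × Int :=
  let d := pvDigit q.2
  if PySem.Int.mod q.1 2 = 1 then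
    if q.1 = 9 then st else (st.1 + d, st.2)
  else
    let d2 := d * 2
    let d3 := if d2 > 9 then d2 - 9 else d2
    (st.1, st.2 + d3)

def validate_cedula (l : List Char) : Bool :=
  -- int(uid[:2]) is PySem.Int.ofChars?; the .getD 0 default is dead under Pre_ (parse succeeds there)
  let first_digits := (PySem.Int.ofChars? (PySem.List.slice l none (some 2))).getD 0
  if first_digits < 1 ∨ first_digits > 24 then false
  else
    let p := (PySem.List.enumerate l 0).foldl pvCedStepA (0, 0)
    let sum_all := p.1 + p.2
    let sum_first_digit := PySem.List.pyGetD (PySem.Int.toChars sum_all) 0 '0'  -- str(sum_all)[0]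
    let decena := (pvDigit sum_first_digit + 1) * 10
    let validator := decena - sum_all
    let validator := if validator = 10 then (0 : Int) else validator
    decide (validator = pvDigit (PySem.List.pyGetD l (-1) '0'))

def validate_ruc (uid : String) : Bool :=
  let l := uid.toList
  if PySem.List.pyGetD l 2 ' ' = '9' then
    let coef : List Int := [4, 3, 2, 7, 6, 5, 4, 3, 2]
    let digits := (PySem.List.slice l none (some 9)).map pvDigit
    let the_sum := ((coef.zip digits).map (fun q => q.1 * q.2)).foldl (· + ·) 0
    let the_sum := 11 - PySem.Int.mod the_sum 11
    let the_sum := if the_sum > 10 then the_sum - 10 else the_sum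
    decide (pvDigit (PySem.List.pyGetD l 9 ' ') = the_sum)
  else if PySem.List.pyGetD l 2 ' ' = '6' then
    let coef : List Int := [3, 2, 7, 6, 5, 4, 3, 2]
    let digits := (PySem.List.slice l none (some 8)).map pvDigit
    let the_sum := ((coef.zip digits).map (fun q => q.1 * q.2)).foldl (· + ·) 0
    let the_sum := 11 - PySem.Int.mod the_sum 11
    let the_sum := if the_sum > 10 then the_sum - 10 else the_sum
    decide (pvDigit (PySem.List.pyGetD l 8 ' ') = the_sum)
  else
    validate_cedula (PySem.List.slice l none (some 10))

-- ===== PORT B =====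
-- int(c) * 2 - 9 * (c > '4'): the doubled-and-corrected even-position digit of Source B
def pvLuhnEven (c : Char) : Int := pvDigit c * 2 - (if '4' < c then 9 else 0)

-- Source B _mod11: fold over reversed(uid[:n]) with state (total, w), w cycling 2..7
def pvMod11B (l : List Char) (n : Int) : Bool :=
  let st := ((PySem.List.slice l none (some n)).reverse).foldl
      (fun (st : Int × Int) c => (st.1 + st.2 * pvDigit c, if st.2 = 7 then 2 else st.2 + 1))
      ((0 : Int), (2 : Int))
  let r := 11 - PySem.Int.mod st.1 11
  let r := if r > 10 then r - 10 else r
  decide (pvDigit (PySem.List.pyGetD l n ' ') = r)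

-- Source B _cedula: two strided slices, one modular check digit
def pvCedulaB (ced : List Char) : Bool :=
  let head := (PySem.Int.ofChars? (PySem.List.slice ced none (some 2))).getD 0
  if ¬ (1 ≤ head ∧ head ≤ 24) then false
  else
    let evens := (PySem.List.slice? ced none (some 9) 2).getD []   -- ced[:9:2]
    let odds := (PySem.List.slice? ced (some 1) (some 9) 2).getD []  -- ced[1:9:2]
    let total := (evens.map pvLuhnEven).sum + (odds.map pvDigit).sum
    decide (pvDigit (PySem.List.pyGetD ced (-1) '0') = PySem.Int.mod (10 - PySem.Int.mod total 10) 10)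

def validate_ruc_alt (uid : String) : Bool :=
  let l := uid.toList
  let kind := PySem.List.pyGetD l 2 ' '
  if kind = '9' then pvMod11B l 9
  else if kind = '6' then pvMod11B l 8
  else pvCedulaB (PySem.List.slice l none (some 10))

-- ===== PRECONDITION & SPEC =====
def pvIsDig (c : Char) : Bool := 48 ≤ c.toNat && c.toNat ≤ 57

-- Exactly the inputs (within Dom) on which Python A returns normally: length ≥ 3 so uid[2] exists;
-- in the '9'/'6' branches enough digit characters for every int() call and index; in the cedula branch
-- int(uid[:2]) must parse, and when it lands in 1..24 every character of uid[:10] is int()-parsed, so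
-- all must be digits (otherwise A raises ValueError/IndexError).
def Pre_validate_ruc (uid : String) : Prop :=
  3 ≤ uid.toList.length ∧
  (if uid.toList.getD 2 ' ' = '9' then
     10 ≤ uid.toList.length ∧ (uid.toList.take 10).all pvIsDig = true
   else if uid.toList.getD 2 ' ' = '6' then
     9 ≤ uid.toList.length ∧ (uid.toList.take 9).all pvIsDig = true
   else (PySem.Int.ofChars? (uid.toList.take 2)).isSome = true ∧
        (1 ≤ (PySem.Int.ofChars? (uid.toList.take 2)).getD 0 →
         (PySem.Int.ofChars? (uid.toList.take 2)).getD 0 ≤ 24 →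
         (uid.toList.take 10).all pvIsDig = true))
instance (uid : String) : Decidable (Pre_validate_ruc uid) := by unfold Pre_validate_ruc; infer_instance

def pvWitness_validate_ruc : String := "0102030405"

-- the weighted cedula digit sum of s (only the first 9 characters count: index 9 is skipped)
-- self-contained spec-side helpers (independent of the ports' code)
def pvD (l : List Char) (i : Nat) : Int := ((l.getD i '0').toNat : Int) - 48

def pvCedSum (l : List Char) : Int :=
  ((List.range 9).map (fun i =>
    if i % 2 = 0 then 2 * pvD l i - (if 4 < pvD l i then 9 else 0) else pvD l i)).sum

-- On cedula-branch inputs whose weighted digit sum S is below 10 and whose last digit equals 10 - S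
-- (e.g. "013", "0100000009"), A's str(sum)[0] decena trick yields the out-of-range validator 9*S+10
-- so A returns False, while B returns True, the intended value under the mod-10 check-digit rule.
def D_validate_ruc (uid : String) : Prop :=
  let l := uid.toList.take 10
  l.getD 2 ' ' ∉ ['9', '6'] ∧ l.all pvIsDig = true ∧
  1 ≤ 10 * pvD l 0 + pvD l 1 ∧ 10 * pvD l 0 + pvD l 1 ≤ 24 ∧
  pvCedSum l < 10 ∧ pvD l (l.length - 1) = 10 - pvCedSum l
instance (uid : String) : Decidable (D_validate_ruc uid) := by unfold D_validate_ruc; infer_instance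

def Spec_validate_ruc (uid : String) (out : Bool) : Prop := ¬ D_validate_ruc uid → out = validate_ruc_alt uid
instance (uid : String) (out : Bool) : Decidable (Spec_validate_ruc uid out) := by unfold Spec_validate_ruc; infer_instance

def pvDiffWitness_validate_ruc : String := "013"
def pvDiffWitnessOut_validate_ruc : Bool × Bool := (false, true)

-- ===== CLAIM (what is proved, stated in full; the proofs are below) =====
def Claim_unchanged_validate_ruc : Prop := ∀ (uid : String), Dom_validate_ruc uid → Pre_validate_ruc uid → Spec_validate_ruc uid (validate_ruc uid)
def Claim_changed_validate_ruc : Prop := Dom_validate_ruc (pvDiffWitness_validate_ruc) ∧ Pre_validate_ruc (pvDiffWitness_validate_ruc) ∧ D_validate_ruc (pvDiffWitness_validate_ruc) ∧ validate_ruc (pvDiffWitness_validate_ruc) = pvDiffWitnessOut_validate_ruc.1 ∧ validate_ruc_alt (pvDiffWitness_validate_ruc) = pvDiffWitnessOut_validate_ruc.2 ∧ pvDiffWitnessOut_validate_ruc.1 ≠ pvDiffWitnessOut_validate_ruc.2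
def Claim_exact_validate_ruc : Prop := ∀ (uid : String), Dom_validate_ruc uid → Pre_validate_ruc uid → D_validate_ruc uid → validate_ruc uid ≠ validate_ruc_alt uid

-- ===== LEMMAS AND PROOFS =====

-- proof-only bridge: single-accumulator form of A's cedula loop (the old two-accumulator fold)
def pvCedStepB (t : Int) (q : Int × Char) : Int :=
  if q.1 = 9 then t
  else
    let d := pvDigit q.2
    let d' := if PySem.Int.mod q.1 2 = 0 then (if d * 2 > 9 then d * 2 - 9 else d * 2) else d
    t + d'

def pvCorr (d : Int) : Int := if 2 * d > 9 then 2 * d - 9 else 2 * d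

lemma pv_digit_cases (c : Char) (h : pvIsDig c = true) :
    c = '0' ∨ c = '1' ∨ c = '2' ∨ c = '3' ∨ c = '4' ∨ c = '5' ∨ c = '6' ∨ c = '7' ∨ c = '8' ∨ c = '9' := by
  simp [pvIsDig] at h
  obtain ⟨h1, h2⟩ := h
  have hc : Char.ofNat c.toNat = c := Char.ofNat_toNat c
  have : c.toNat = 48 ∨ c.toNat = 49 ∨ c.toNat = 50 ∨ c.toNat = 51 ∨ c.toNat = 52 ∨ c.toNat = 53 ∨
      c.toNat = 54 ∨ c.toNat = 55 ∨ c.toNat = 56 ∨ c.toNat = 57 := by omega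
  rcases this with h|h|h|h|h|h|h|h|h|h <;> rw [h] at hc <;> simp_all <;> rw [← hc] <;> decide

lemma pv_corr_eq (d : Int) : pvCorr d = 2 * d - (if 4 < d then 9 else 0) := by
  unfold pvCorr; split_ifs <;> omega

-- '4' < c compares code points, so it coincides with 4 < (c.toNat - 48) on every Char
lemma pv_lt4 (c : Char) : (if '4' < c then (9 : Int) else 0) = if 4 < (c.toNat : Int) - 48 then 9 else 0 := by
  have hiff : ('4' < c) ↔ 52 < c.toNat := by
    rw [Char.lt_def, UInt32.lt_iff_toNat_lt]
    constructor <;> intro h <;> exact h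
  by_cases h : '4' < c
  · rw [if_pos h, if_pos (by have := hiff.mp h; omega)]
  · rw [if_neg h, if_neg (by intro hc; exact h (hiff.mpr (by omega)))]

lemma pv_ofChars_two (c0 c1 : Char) (h0 : pvIsDig c0 = true) (h1 : pvIsDig c1 = true) :
    PySem.Int.ofChars? [c0, c1] = some (10 * pvDigit c0 + pvDigit c1) := by
  rcases pv_digit_cases c0 h0 with rfl|rfl|rfl|rfl|rfl|rfl|rfl|rfl|rfl|rfl <;>
    rcases pv_digit_cases c1 h1 with rfl|rfl|rfl|rfl|rfl|rfl|rfl|rfl|rfl|rfl <;> decide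

lemma pv_digit_bounds (c : Char) (h : pvIsDig c = true) : 0 ≤ pvDigit c ∧ pvDigit c ≤ 9 := by
  simp [pvIsDig] at h
  simp [pvDigit]
  omega

lemma pv_mod2_cases (i : Int) : PySem.Int.mod i 2 = 0 ∨ PySem.Int.mod i 2 = 1 := by
  have h1 := PySem.Int.mod_nonneg i (b := 2) (by norm_num)
  have h2 := PySem.Int.mod_lt i (b := 2) (by norm_num)
  omega

lemma pv_stepAB : ∀ (xs : List (Int × Char)) (e o t : Int), e + o = t →
    ((xs.foldl pvCedStepA (e, o)).1 + (xs.foldl pvCedStepA (e, o)).2) = xs.foldl pvCedStepB t := by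
  intro xs
  induction xs with
  | nil => intro e o t h; simpa using h
  | cons q xs ih =>
    intro e o t h
    simp only [List.foldl_cons]
    by_cases h9 : q.1 = 9
    · have hm : PySem.Int.mod q.1 2 = 1 := by rw [h9]; decide
      simp only [pvCedStepA, pvCedStepB, h9, if_pos]
      exact ih e o t h
    · rcases pv_mod2_cases q.1 with hm | hm
      · simp only [pvCedStepA, pvCedStepB, hm, if_neg h9]
        norm_num
        apply ih
        omega
      · simp only [pvCedStepA, pvCedStepB, hm, if_neg h9]
        norm_num
        apply ih
        omega

lemma pv_le_stepB : ∀ (xs : List (Int × Char)) (t : Int), (∀ q ∈ xs, pvIsDig q.2 = true) →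
    t ≤ xs.foldl pvCedStepB t := by
  intro xs
  induction xs with
  | nil => intro t _; simp
  | cons q xs ih =>
    intro t hd
    simp only [List.foldl_cons]
    refine le_trans ?_ (ih _ (fun p hp => hd p (List.mem_cons_of_mem _ hp)))
    have hq' : 48 ≤ q.2.toNat ∧ q.2.toNat ≤ 57 := by
      simpa [pvIsDig] using hd q List.mem_cons_self
    simp only [pvCedStepB, pvDigit]
    split_ifs <;> omega

lemma pv_stepB_le : ∀ (xs : List (Int × Char)) (t : Int), (∀ q ∈ xs, pvIsDig q.2 = true) →
    xs.foldl pvCedStepB t ≤ t + 9 * xs.length := by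
  intro xs
  induction xs with
  | nil => intro t _; simp
  | cons q xs ih =>
    intro t hd
    simp only [List.foldl_cons, List.length_cons]
    refine le_trans (ih _ (fun p hp => hd p (List.mem_cons_of_mem _ hp))) ?_
    have hq' : 48 ≤ q.2.toNat ∧ q.2.toNat ≤ 57 := by
      simpa [pvIsDig] using hd q List.mem_cons_self
    have hub : pvCedStepB t q ≤ t + 9 := by
      simp only [pvCedStepB, pvDigit]
      split_ifs <;> omega
    push_cast
    omega

lemma pv_cedSum_rel : ∀ (xs : List Char) (k : Nat) (t : Int), k + xs.length ≤ 10 →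
    (PySem.List.enumerate xs (k : Int)).foldl pvCedStepB t
      = t + (((xs.take (9 - k)).zipIdx k).map
          (fun q => if q.2 % 2 = 0 then pvCorr (pvDigit q.1) else pvDigit q.1)).sum := by
  intro xs
  induction xs with
  | nil => intro k t _; simp [PySem.List.enumerate_nil]
  | cons x xs ih =>
    intro k t hlen
    simp only [List.length_cons] at hlen
    rw [PySem.List.enumerate_cons, List.foldl_cons]
    by_cases h9 : k = 9
    · have hx : xs = [] := by
        cases xs with
        | nil => rfl
        | cons y ys => simp at hlen; omega
      subst h9; subst hx
      simp [pvCedStepB, PySem.List.enumerate_nil]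
    · have hk : k < 9 := by omega
      have htake : (x :: xs).take (9 - k) = x :: xs.take (8 - k) := by
        have : 9 - k = (8 - k) + 1 := by omega
        rw [this]; rfl
      rw [htake]
      have hstep : pvCedStepB t ((k : Int), x)
          = t + (if k % 2 = 0 then pvCorr (pvDigit x) else pvDigit x) := by
        have h9' : ¬((k : Int) = 9) := by omega
        have hmv : PySem.Int.mod (k : Int) 2 = ((k % 2 : Nat) : Int) := PySem.Int.mod_natCast k 2
        by_cases hm : k % 2 = 0
        · have hb : PySem.Int.mod (k : Int) 2 = 0 := by rw [hmv, hm]; rfl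
          simp only [pvCedStepB, h9', if_false, hb, pvCorr, hm]
          simp [mul_comm]
        · have hb : ¬(PySem.Int.mod (k : Int) 2 = 0) := by rw [hmv]; omega
          simp only [pvCedStepB, h9', if_false, hb, hm]
      have hcast : ((k : Int) + 1) = ((k + 1 : Nat) : Int) := by push_cast; ring
      rw [hstep, hcast, ih (k + 1) _ (by omega)]
      have h8 : 8 - k = 9 - (k + 1) := by omega
      rw [List.zipIdx_cons, List.map_cons, List.sum_cons, h8]
      ring

-- the pvCorr-form sum of A's loop equals pvCedSum (any chars: missing indices contribute 0)
lemma pv_corrSum_eq (x y z : Char) (rest : List Char) (hle : rest.length ≤ 7) :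
    (((x::y::z::rest).take 9).zipIdx.map
        (fun q => if q.2 % 2 = 0 then pvCorr (pvDigit q.1) else pvDigit q.1)).sum
      = pvCedSum (x::y::z::rest) := by
  rcases rest with _|⟨d,_|⟨e,_|⟨f,_|⟨g,_|⟨h,_|⟨i,_|⟨j,_|⟨k,rest⟩⟩⟩⟩⟩⟩⟩⟩ <;>
    first
    | (simp only [List.length_cons] at hle; omega)
    | (simp [pvCedSum, pvD, pvDigit, pv_corr_eq, List.range_succ, List.zipIdx_cons]; try ring)

lemma pv_fd (S : Int) (h1 : 1 ≤ S) (h2 : S ≤ 90) :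
    (S < 10 → pvDigit (PySem.List.pyGetD (PySem.Int.toChars S) 0 '0') = S) ∧
    (10 ≤ S → pvDigit (PySem.List.pyGetD (PySem.Int.toChars S) 0 '0') * 10 ≤ S ∧
              S < pvDigit (PySem.List.pyGetD (PySem.Int.toChars S) 0 '0') * 10 + 10) := by
  interval_cases S <;> exact ⟨by intro h; first | rfl | omega, by intro h; first | exact ⟨by decide, by decide⟩ | omega⟩

lemma pv_all_enum (s : List Char) (k : Int) (hall : ∀ c ∈ s, pvIsDig c = true) :
    ∀ q ∈ PySem.List.enumerate s k, pvIsDig q.2 = true := by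
  intro q hq
  rcases (PySem.List.mem_enumerate_iff _ _ _).mp hq with ⟨j, hj, rfl⟩
  exact hall _ (List.getElem_mem hj)

lemma pv_ced_core (x y z : Char) (rest : List Char)
    (hall : ∀ c ∈ (x::y::z::rest), pvIsDig c = true)
    (h1 : 1 ≤ 10 * pvDigit x + pvDigit y) (hle : rest.length ≤ 7) :
    1 ≤ (PySem.List.enumerate (x::y::z::rest) 0).foldl pvCedStepB 0 ∧
    (PySem.List.enumerate (x::y::z::rest) 0).foldl pvCedStepB 0 ≤ 90 ∧
    (PySem.List.enumerate (x::y::z::rest) 0).foldl pvCedStepB 0 = pvCedSum (x::y::z::rest) := by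
  refine ⟨?_, ?_, ?_⟩
  · rw [PySem.List.enumerate_cons, PySem.List.enumerate_cons, List.foldl_cons, List.foldl_cons]
    refine le_trans ?_ (pv_le_stepB _ _ (pv_all_enum _ _ (fun c hc => hall c (by simp at hc ⊢; tauto))))
    have hx : 48 ≤ x.toNat ∧ x.toNat ≤ 57 := by simpa [pvIsDig] using hall x (by simp)
    have hy : 48 ≤ y.toNat ∧ y.toNat ≤ 57 := by simpa [pvIsDig] using hall y (by simp)
    simp only [pvCedStepB, pvDigit] at h1 ⊢
    norm_num
    split_ifs <;> omega
  · refine le_trans (pv_stepB_le _ _ (pv_all_enum _ _ hall)) ?_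
    have hlen := PySem.List.length_enumerate (xs := x::y::z::rest) (s := 0)
    rw [hlen]
    simp only [List.length_cons]
    push_cast
    omega
  · have hrel := pv_cedSum_rel (x::y::z::rest) 0 0 (by simp; omega)
    simp only [Nat.cast_zero] at hrel
    rw [hrel]
    rw [← pv_corrSum_eq x y z rest hle]
    norm_num

-- B's strided-slice total equals pvCedSum (pure list computation; no digit facts needed)
set_option maxHeartbeats 1600000 in
lemma pv_slices_eq (x y z : Char) (rest : List Char) (hle : rest.length ≤ 7) :
    ((((PySem.List.slice? (x::y::z::rest) none (some 9) 2).getD []).map pvLuhnEven).sum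
      + (((PySem.List.slice? (x::y::z::rest) (some 1) (some 9) 2).getD []).map pvDigit).sum)
      = pvCedSum (x::y::z::rest) := by
  rcases rest with _|⟨d,_|⟨e,_|⟨f,_|⟨g,_|⟨h,_|⟨i,_|⟨j,_|⟨k,rest⟩⟩⟩⟩⟩⟩⟩⟩ <;>
    first
    | (simp only [List.length_cons] at hle; omega)
    | (simp [PySem.List.slice?, PySem.List.sliceIndices, List.range_succ, pvCedSum,
        pvD, pvLuhnEven, pvDigit, pv_lt4]; try ring)

set_option maxHeartbeats 1600000 in
lemma pv_ced_main (x y z : Char) (rest : List Char) (hle : rest.length ≤ 7)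
    (hsome : (PySem.Int.ofChars? [x, y]).isSome = true)
    (hdig : 1 ≤ (PySem.Int.ofChars? [x, y]).getD 0 →
            (PySem.Int.ofChars? [x, y]).getD 0 ≤ 24 →
            (x::y::z::rest).all pvIsDig = true)
    (hnD : (x::y::z::rest).all pvIsDig = true → 1 ≤ 10 * pvDigit x + pvDigit y →
           10 * pvDigit x + pvDigit y ≤ 24 →
           ¬(pvCedSum (x::y::z::rest) < 10 ∧
             pvDigit ((x::y::z::rest).getD ((x::y::z::rest).length - 1) '0')
               = 10 - pvCedSum (x::y::z::rest))) :
    validate_cedula (x::y::z::rest) = pvCedulaB (x::y::z::rest) := by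
  obtain ⟨v, hv⟩ := Option.isSome_iff_exists.mp hsome
  simp only [validate_cedula, pvCedulaB]
  have hsl : PySem.List.slice (x::y::z::rest) none (some 2) = [x, y] := by simp [pysem]
  rw [hsl, hv]
  simp only [Option.getD_some]
  by_cases hg : v < 1 ∨ 24 < v
  · rw [if_pos (by tauto), if_pos (by omega)]
  · have h1v : 1 ≤ v := by omega
    have h2v : v ≤ 24 := by omega
    have hall := hdig (by rw [hv]; simpa using h1v) (by rw [hv]; simpa using h2v)
    have halls : ∀ c ∈ (x::y::z::rest), pvIsDig c = true := List.all_eq_true.mp hall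
    have hx := pv_digit_bounds x (halls x (by simp))
    have hy := pv_digit_bounds y (halls y (by simp))
    have hvv : v = 10 * pvDigit x + pvDigit y := by
      have h2 := pv_ofChars_two x y (halls x (by simp)) (halls y (by simp))
      rw [hv] at h2
      exact Option.some_inj.mp h2
    obtain ⟨hT1, hT90, hTsum⟩ := pv_ced_core x y z rest halls (by omega) hle
    rw [if_neg (show ¬(v < 1 ∨ v > 24) by omega), if_neg (show ¬¬(1 ≤ v ∧ v ≤ 24) by omega)]
    have hAB := pv_stepAB (PySem.List.enumerate (x::y::z::rest) 0) 0 0 0 (by ring)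
    rw [hAB]
    rw [pv_slices_eq x y z rest hle]
    have hne : (x::y::z::rest) ≠ [] := by simp
    have hlast : PySem.List.pyGetD (x::y::z::rest) (-1) '0' = (x::y::z::rest).getLast hne :=
      PySem.List.pyGetD_neg_one _ _ hne
    have hLb := pv_digit_bounds _ (halls _ (List.getLast_mem hne))
    rw [hlast]
    have hgetD : (x::y::z::rest).getD ((x::y::z::rest).length - 1) '0'
        = (x::y::z::rest).getLast hne := by
      rw [List.getLast_eq_getElem, List.getD_eq_getElem _ _ (by simp)]
      rfl
    have hnD' := hnD hall (by omega) (by omega)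
    rw [hgetD] at hnD'
    rw [← hTsum] at hnD'
    obtain ⟨hfd1, hfd2⟩ := pv_fd _ hT1 hT90
    rw [← hTsum]
    rw [PySem.Int.mod_eq_emod_of_pos (by norm_num), PySem.Int.mod_eq_emod_of_pos (by norm_num)]
    split_ifs with hc
    · simp only [decide_eq_decide]
      constructor <;> intro hh <;> omega
    · simp only [decide_eq_decide]
      constructor <;> intro hh <;> omega

set_option maxHeartbeats 1600000 in
lemma pv_ced_diff (x y z : Char) (rest : List Char) (hle : rest.length ≤ 7)
    (hall : (x::y::z::rest).all pvIsDig = true)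
    (h1 : 1 ≤ 10 * pvDigit x + pvDigit y) (h2 : 10 * pvDigit x + pvDigit y ≤ 24)
    (hS : pvCedSum (x::y::z::rest) < 10)
    (hL : pvDigit ((x::y::z::rest).getD ((x::y::z::rest).length - 1) '0')
            = 10 - pvCedSum (x::y::z::rest)) :
    validate_cedula (x::y::z::rest) = false ∧ pvCedulaB (x::y::z::rest) = true := by
  have halls : ∀ c ∈ (x::y::z::rest), pvIsDig c = true := List.all_eq_true.mp hall
  have hx := pv_digit_bounds x (halls x (by simp))
  have hy := pv_digit_bounds y (halls y (by simp))
  have hv := pv_ofChars_two x y (halls x (by simp)) (halls y (by simp))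
  simp only [validate_cedula, pvCedulaB]
  have hsl : PySem.List.slice (x::y::z::rest) none (some 2) = [x, y] := by simp [pysem]
  rw [hsl, hv]
  simp only [Option.getD_some]
  obtain ⟨hT1, hT90, hTsum⟩ := pv_ced_core x y z rest halls (by omega) hle
  rw [if_neg (show ¬(10 * pvDigit x + pvDigit y < 1 ∨ 10 * pvDigit x + pvDigit y > 24) by omega),
     if_neg (show ¬¬(1 ≤ 10 * pvDigit x + pvDigit y ∧ 10 * pvDigit x + pvDigit y ≤ 24) by omega)]
  have hAB := pv_stepAB (PySem.List.enumerate (x::y::z::rest) 0) 0 0 0 (by ring)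
  rw [hAB]
  rw [pv_slices_eq x y z rest hle]
  have hne : (x::y::z::rest) ≠ [] := by simp
  have hlast : PySem.List.pyGetD (x::y::z::rest) (-1) '0' = (x::y::z::rest).getLast hne :=
    PySem.List.pyGetD_neg_one _ _ hne
  rw [hlast]
  have hgetD : (x::y::z::rest).getD ((x::y::z::rest).length - 1) '0'
      = (x::y::z::rest).getLast hne := by
    rw [List.getLast_eq_getElem, List.getD_eq_getElem _ _ (by simp)]
    rfl
  rw [hgetD] at hL
  rw [← hTsum] at hS hL ⊢
  obtain ⟨hfd1, hfd2⟩ := pv_fd _ hT1 hT90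
  rw [PySem.Int.mod_eq_emod_of_pos (by norm_num), PySem.Int.mod_eq_emod_of_pos (by norm_num)]
  constructor
  · split_ifs with hc
    · simp only [decide_eq_false_iff_not]
      omega
    · simp only [decide_eq_false_iff_not]
      omega
  · simp only [decide_eq_true_eq]
    omega

-- ===== VERDICT (statements are the Claim_ definitions above) =====
set_option maxHeartbeats 6000000 in
theorem validate_ruc_spec : Claim_unchanged_validate_ruc := by
  intro uid _ hpre hnD
  unfold Pre_validate_ruc at hpre
  unfold D_validate_ruc at hnD
  show validate_ruc uid = validate_ruc_alt uid
  simp only [validate_ruc, validate_ruc_alt]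
  generalize hl : uid.toList = l at hpre hnD ⊢
  obtain ⟨h3, hbr⟩ := hpre
  rcases l with _ | ⟨a, _ | ⟨b, _ | ⟨c, r⟩⟩⟩ <;> try (simp at h3)
  have hgd : (a::b::c::r).getD 2 ' ' = c := rfl
  rw [hgd] at hbr
  have hg2 : PySem.List.pyGetD (a::b::c::r) 2 ' ' = c := by simp [pysem]
  rw [hg2]
  by_cases h9 : c = '9'
  · subst h9
    rw [if_pos rfl] at hbr
    obtain ⟨h10, _⟩ := hbr
    simp only [List.length_cons] at h10
    simp only [reduceIte]
    rcases r with _|⟨d3, _|⟨d4, _|⟨d5, _|⟨d6, _|⟨d7, _|⟨d8, _|⟨d9, r⟩⟩⟩⟩⟩⟩⟩ <;>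
      try (simp at h10)
    simp [pvMod11B, pysem]
    ring_nf
  · by_cases h6 : c = '6'
    · subst h6
      rw [if_neg (by decide), if_pos rfl] at hbr
      obtain ⟨h8, _⟩ := hbr
      simp only [List.length_cons] at h8
      simp only [reduceIte]
      rcases r with _|⟨d3, _|⟨d4, _|⟨d5, _|⟨d6, _|⟨d7, _|⟨d8, r⟩⟩⟩⟩⟩⟩ <;>
        try (simp at h8)
      simp [pvMod11B, pysem]
      ring_nf
    · rw [if_neg h9, if_neg h6] at hbr
      simp only [if_neg h9, if_neg h6]
      have hs10 : PySem.List.slice (a::b::c::r) none (some 10) = a::b::c::(r.take 7) := by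
        simp [pysem]
      rw [hs10]
      have htake2 : List.take 2 (a::b::c::r) = [a, b] := by simp
      have htake10 : List.take 10 (a::b::c::r) = a::b::c::(r.take 7) := by simp
      rw [htake2] at hbr
      rw [htake10] at hnD
      refine pv_ced_main a b c (r.take 7) (by simp) hbr.1 hbr.2 ?_
      intro hall hh1 hh2 hSL
      apply hnD
      exact ⟨by simp [h9, h6], hall, hh1, hh2, hSL.1, hSL.2⟩

set_option maxHeartbeats 1600000 in
theorem validate_ruc_tight : Claim_exact_validate_ruc := by
  intro uid _ hpre hD
  unfold Pre_validate_ruc at hpre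
  unfold D_validate_ruc at hD
  simp only [validate_ruc, validate_ruc_alt, ne_eq]
  generalize hl : uid.toList = l at hpre hD ⊢
  obtain ⟨h3, -⟩ := hpre
  rcases l with _ | ⟨a, _ | ⟨b, _ | ⟨c, r⟩⟩⟩ <;> try (simp at h3)
  have htake10 : List.take 10 (a::b::c::r) = a::b::c::(r.take 7) := by simp
  rw [htake10] at hD
  obtain ⟨hmm, hall, hh1, hh2, hS, hL⟩ := hD
  have hmm' : c ∉ (['9', '6'] : List Char) := hmm
  have h9' : c ≠ '9' := by intro h; exact hmm' (by simp [h])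
  have h6' : c ≠ '6' := by intro h; exact hmm' (by simp [h])
  have hg2 : PySem.List.pyGetD (a::b::c::r) 2 ' ' = c := by simp [pysem]
  rw [hg2]
  simp only [if_neg h9', if_neg h6']
  have hs10 : PySem.List.slice (a::b::c::r) none (some 10) = a::b::c::(r.take 7) := by
    simp [pysem]
  rw [hs10]
  obtain ⟨hA, hB⟩ := pv_ced_diff a b c (r.take 7) (by simp) hall hh1 hh2 hS hL
  rw [hA, hB]
  simp

-- ===== VERDICT =====
theorem validate_ruc_changed : Claim_changed_validate_ruc := by
  unfold Claim_changed_validate_ruc; decide
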